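-- pv_equiv track=rewrite | github.com/miftad456/A2SV_Solved_Questions | 3591-check-if-any-element-has-prime-frequency/3591-check-if-any-element-has-prime-frequency.py | checkPrimeFrequency
-- ===== SOURCE A (Python) =====
-- from typing import List
--
-- def checkPrimeFrequency(nums: List[int]) -> bool:
--     import math
--     from collections import Counter
--     def is_prime(n):
--         if n <= 1:
--             return False
--         if n <= 3:
--             return True
--         if n % 2 == 0:
--             return False
--
--         limit = int(math.sqrt(n))
--         for i in range(3, limit + 1, 2):
--             if n % i == 0:
--                 return False
--         return True
--     freq =  Counter(nums)
--     for i in freq: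
--         if is_prime(freq[i]):
--             return True
--     else:
--         return False
-- ===== SOURCE B (Python) =====
-- from typing import List
--
-- def checkPrimeFrequency(nums: List[int]) -> bool:
--     from collections import Counter
--     vals = list(Counter(nums).values())
--     if not vals:
--         return False
--     m = max(vals)
--     # boolean prime table over 0..m: cross out every proper multiple p*k (p,k >= 2)
--     sieve = [True] * (m + 1)
--     sieve[0] = False
--     sieve[1] = False
--     for p in range(2, m + 1):
--         for k in range(2, m // p + 1):
--             sieve[p * k] = False
--     return any(sieve[v] for v in vals)
-- ===== Notes on version B (the rewrite author's own statement) =====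
-- stated objective: alternative
-- what changed: A tests each frequency with sqrt-bounded odd trial division inside an early-return key loop; B takes the counter's values, builds one boolean prime table over 0..max(values) by crossing out every proper multiple, and answers with table lookups.
import Mathlib
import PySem

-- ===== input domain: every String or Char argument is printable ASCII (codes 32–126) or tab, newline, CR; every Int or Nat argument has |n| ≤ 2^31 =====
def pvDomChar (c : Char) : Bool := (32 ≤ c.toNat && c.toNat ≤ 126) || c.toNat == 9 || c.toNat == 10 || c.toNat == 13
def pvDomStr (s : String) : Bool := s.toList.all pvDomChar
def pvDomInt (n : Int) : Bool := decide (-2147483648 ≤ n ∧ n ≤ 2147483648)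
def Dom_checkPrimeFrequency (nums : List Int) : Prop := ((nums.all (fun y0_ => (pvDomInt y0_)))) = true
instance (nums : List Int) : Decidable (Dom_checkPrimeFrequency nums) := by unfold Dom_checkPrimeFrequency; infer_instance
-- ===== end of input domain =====

-- B replaces A's per-frequency sqrt trial division with one crossed-out-multiples prime table over 0..max(frequency); return values agree on all inputs (alternative algorithm, not claimed faster).


-- ===== PORT A =====
-- is_prime's loop 'for i in range(3, limit+1, 2): if n % i == 0: return False / return True'
def pvIsPrimeLoop (n : Int) : List Int → Bool
  | [] => true
  | i :: rest => if PySem.Int.mod n i == 0 then false else pvIsPrimeLoop n rest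

def pvIsPrime (n : Int) : Bool :=
  if n ≤ 1 then false
  else if n ≤ 3 then true
  else if PySem.Int.mod n 2 == 0 then false
  else
    -- limit = int(math.sqrt(n)) ported as Nat.sqrt: exact for 0 ≤ n < 2^52 (Dom bounds |n| ≤ 2^31)
    pvIsPrimeLoop n (PySem.List.pyRange 3 ((Nat.sqrt n.toNat : Int) + 1) 2)

-- 'for i in freq: if is_prime(freq[i]): return True / else: return False' (freq[i] with i a key = getD i 0)
def pvScan (freq : PySem.Dict Int Int) : List Int → Bool
  | [] => false
  | k :: rest => if pvIsPrime (freq.getD k 0) then true else pvScan freq rest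

def checkPrimeFrequency (nums : List Int) : Bool :=
  let freq := PySem.Dict.counter nums
  pvScan freq freq.keys

-- ===== PORT B =====
-- 'for p in range(2, m+1): for k in range(2, m//p+1): sieve[p*k] = False'  (p*k ≥ 0, so .toNat is exact)
def pvCross (m : Int) (sieve : List Bool) : List Bool :=
  (PySem.List.pyRange 2 (m + 1) 1).foldl
    (fun s p =>
      (PySem.List.pyRange 2 (PySem.Int.floordiv m p + 1) 1).foldl
        (fun s k => s.set (p * k).toNat false) s)
    sieve

def checkPrimeFrequency_alt (nums : List Int) : Bool :=
  let vals := (PySem.Dict.counter nums).values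
  -- 'if not vals: return False' / 'm = max(vals)' : max? is none exactly on the empty list
  match PySem.List.max? vals (fun v => v) with
  | none => false
  | some m =>
    let sieve0 := ((List.replicate (m + 1).toNat true).set 0 false).set 1 false
    let sieve := pvCross m sieve0
    -- 'any(sieve[v] for v in vals)': every v is a frequency, 1 ≤ v ≤ m, so the index is in range
    vals.any (fun v => (PySem.List.pyGet? sieve v).getD false)

-- ===== PRECONDITION & SPEC =====
def Spec_checkPrimeFrequency (nums : List Int) (out : Bool) : Prop := out = checkPrimeFrequency_alt nums
instance (nums : List Int) (out : Bool) : Decidable (Spec_checkPrimeFrequency nums out) := by unfold Spec_checkPrimeFrequency; infer_instance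

-- ===== CLAIM (what is proved, stated in full; the proofs are below) =====
def Claim_equal_checkPrimeFrequency : Prop := ∀ (nums : List Int), Dom_checkPrimeFrequency nums → Spec_checkPrimeFrequency nums (checkPrimeFrequency nums)

-- ===== LEMMAS AND PROOFS =====

-- pvScan is an early-return loop: it is List.any
theorem pvScan_eq_any (freq : PySem.Dict Int Int) (ks : List Int) :
    pvScan freq ks = ks.any (fun k => pvIsPrime (freq.getD k 0)) := by
  induction ks with
  | nil => rfl
  | cons k rest ih => simp [pvScan, ih]

theorem pvIsPrimeLoop_eq_all (n : Int) (l : List Int) :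
    pvIsPrimeLoop n l = l.all (fun i => !(PySem.Int.mod n i == 0)) := by
  induction l with
  | nil => rfl
  | cons i rest ih =>
    simp only [pvIsPrimeLoop, List.all_cons, ih]
    by_cases h : PySem.Int.mod n i == 0 <;> simp [h]

-- A's trial division decides primality of the (positive) frequency
theorem pvIsPrime_eq (v : Int) (h1 : 1 ≤ v) : pvIsPrime v = decide (Nat.Prime v.toNat) := by
  set n := v.toNat with hndef
  have hv : v = (n : Int) := by omega
  unfold pvIsPrime
  split_ifs with hle1 hle3 heven
  · -- v ≤ 1 → n = 1
    have : n = 1 := by omega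
    simp [this, Nat.not_prime_one]
  · -- v = 2 or 3
    have : n = 2 ∨ n = 3 := by omega
    rcases this with h | h <;> simp [h, Nat.prime_two, Nat.prime_three]
  · -- even, v ≥ 4
    have h2 : (2:Int) ∣ v := by
      rwa [beq_iff_eq, PySem.Int.mod_eq_zero_iff_dvd] at heven
    have h2n : 2 ∣ n := by
      rcases h2 with ⟨c, hc⟩
      exact ⟨c.toNat, by omega⟩
    have : ¬ Nat.Prime n := by
      intro hp
      rcases (Nat.Prime.eq_one_or_self_of_dvd hp 2 h2n) with h | h <;> omega
    simp [this]
  · -- odd, v ≥ 5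
    have hodd : ¬ (2:Int) ∣ v := by
      rw [beq_iff_eq] at heven
      rw [← PySem.Int.mod_eq_zero_iff_dvd]
      exact heven
    have hn5 : 5 ≤ n := by
      have h4 : 4 ≤ v := by omega
      have : v ≠ 4 := by
        intro h
        exact hodd ⟨2, by omega⟩
      omega
    have hoddn : ¬ 2 ∣ n := by
      intro ⟨c, hc⟩
      exact hodd ⟨c, by omega⟩
    rw [pvIsPrimeLoop_eq_all, ← hndef]
    rw [Bool.eq_iff_iff]
    simp only [List.all_eq_true, Bool.not_eq_eq_eq_not, Bool.not_true,
      beq_eq_false_iff_ne, ne_eq, decide_eq_true_eq]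
    constructor
    · -- no divisor found → prime
      intro hall
      by_contra hnp
      -- minimal factor p: odd, 3 ≤ p ≤ sqrt n
      have hp := Nat.minFac_prime (n := n) (by omega)
      set p := n.minFac with hpdef
      have hpd : p ∣ n := Nat.minFac_dvd n
      have hp2 : p ≠ 2 := by
        intro h
        exact hoddn (h ▸ hpd)
      have hp3 : 3 ≤ p := by
        have := hp.two_le
        omega
      have hsq : p * p ≤ n := by
        have := Nat.minFac_sq_le_self (n := n) (by omega) hnp
        nlinarith [this]
      have hple : p ≤ Nat.sqrt n := Nat.le_sqrt.mpr hsq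
      have hpodd : p % 2 = 1 := by
        rcases Nat.even_or_odd p with he | ho
        · exfalso
          rcases he with ⟨c, hc⟩
          exact hoddn (dvd_trans ⟨c, by omega⟩ hpd)
        · exact Nat.odd_iff.mp ho
      have hmem : (p : Int) ∈ PySem.List.pyRange 3 ((Nat.sqrt n : Int) + 1) 2 := by
        rw [PySem.List.mem_pyRange_iff_of_pos (by norm_num)]
        refine ⟨by exact_mod_cast hp3, by exact_mod_cast (by omega : p < Nat.sqrt n + 1), ?_⟩
        omega
      refine hall (p : Int) hmem ?_
      rw [PySem.Int.mod_eq_zero_iff_dvd]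
      rw [hv]
      exact_mod_cast hpd
    · -- prime → no divisor
      intro hprime i hi
      rw [PySem.List.mem_pyRange_iff_of_pos (by norm_num)] at hi
      obtain ⟨hi3, hilt, -⟩ := hi
      intro hmod
      rw [PySem.Int.mod_eq_zero_iff_dvd] at hmod
      have hidvd : i.toNat ∣ n := by
        rcases hmod with ⟨c, hc⟩
        have hc0 : 0 ≤ c := by nlinarith
        refine ⟨c.toNat, ?_⟩
        have h2 : ((i.toNat * c.toNat : Nat) : Int) = (n : Int) := by
          push_cast
          rw [Int.toNat_of_nonneg (by omega : (0:Int) ≤ i), Int.toNat_of_nonneg hc0]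
          exact hc.symm.trans hv
        exact_mod_cast h2.symm
      have hilt' : i.toNat < n := by
        have hs : Nat.sqrt n < n := Nat.sqrt_lt_self (by omega)
        omega
      rcases hprime.eq_one_or_self_of_dvd i.toNat hidvd with h | h <;> omega

-- a loop of 'sieve[f x] = False' writes, read back
theorem getElem?_foldl_set {α : Type} (l : List α) (f : α → Nat) (s : List Bool) (j : Nat) :
    (l.foldl (fun s x => s.set (f x) false) s)[j]? =
      if (∃ x ∈ l, f x = j) ∧ j < s.length then some false else s[j]? := by
  induction l generalizing s with
  | nil => simp
  | cons a l ih =>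
    simp only [List.foldl_cons, ih, List.length_set, List.getElem?_set]
    by_cases hm : f a = j <;> by_cases hl : j < s.length <;> simp_all

theorem length_foldl_set {α : Type} (l : List α) (f : α → Nat) (s : List Bool) :
    (l.foldl (fun s x => s.set (f x) false) s).length = s.length := by
  induction l generalizing s with
  | nil => rfl
  | cons a l ih => simp [ih]

-- the nested crossing loop of pvCross, read back
theorem getElem?_foldl_foldl_set (ps : List Int) (g : Int → List Int) (f : Int → Int → Nat)
    (s : List Bool) (j : Nat) :
    (ps.foldl (fun s p => (g p).foldl (fun s k => s.set (f p k) false) s) s)[j]? =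
      if (∃ p ∈ ps, ∃ k ∈ g p, f p k = j) ∧ j < s.length then some false else s[j]? := by
  induction ps generalizing s with
  | nil => simp
  | cons a ps ih =>
    simp only [List.foldl_cons, ih, length_foldl_set, getElem?_foldl_set]
    by_cases hm : ∃ k ∈ g a, f a k = j <;> by_cases hl : j < s.length <;>
      simp_all <;> split_ifs <;> simp_all <;> tauto

-- crossing characterisation: j ≥ 2 is crossed out iff it is composite
theorem pvCrossed_iff (m : Int) (j : Nat) (hj : 2 ≤ j) (hjm : (j : Int) ≤ m) :
    ((∃ p ∈ PySem.List.pyRange 2 (m + 1) 1,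
        ∃ k ∈ PySem.List.pyRange 2 (PySem.Int.floordiv m p + 1) 1, (p * k).toNat = j)
      ↔ ¬ Nat.Prime j) := by
  constructor
  · rintro ⟨p, hp, k, hk, hpk⟩ hprime
    rw [PySem.List.mem_pyRange_one] at hp hk
    have hp2 : 2 ≤ p := hp.1
    have hk2 : 2 ≤ k := hk.1
    have hj' : (j : Int) = p * k := by
      have : (0:Int) ≤ p * k := by positivity
      omega
    have hdvd : p.toNat ∣ j := by
      refine ⟨k.toNat, ?_⟩
      have : ((p.toNat * k.toNat : Nat) : Int) = (j : Int) := by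
        push_cast
        rw [Int.toNat_of_nonneg (by omega), Int.toNat_of_nonneg (by omega)]
        omega
      exact_mod_cast this.symm
    rcases hprime.eq_one_or_self_of_dvd p.toNat hdvd with h1 | h1
    · omega
    · -- p.toNat = j, but j = p*k with k ≥ 2
      have : (j:Int) = p := by rw [← h1]; omega
      nlinarith
  · intro hprime
    have hj1 : j ≠ 1 := by omega
    set p := j.minFac with hpdef
    have hpp : Nat.Prime p := Nat.minFac_prime hj1
    have hpd : p ∣ j := Nat.minFac_dvd j
    have hplt : p < j := (Nat.not_prime_iff_minFac_lt hj).mp hprime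
    have hp2 : 2 ≤ p := hpp.two_le
    set k := j / p with hkdef
    have hmul : p * k = j := Nat.mul_div_cancel' hpd
    have hk2 : 2 ≤ k := by
      rcases Nat.lt_or_ge k 2 with h | h
      · interval_cases k <;> omega
      · exact h
    refine ⟨(p : Int), ?_, (k : Int), ?_, ?_⟩
    · rw [PySem.List.mem_pyRange_one]
      constructor
      · exact_mod_cast hp2
      · have : (p : Int) < (j : Int) := by exact_mod_cast hplt
        omega
    · rw [PySem.List.mem_pyRange_one]
      refine ⟨by exact_mod_cast hk2, ?_⟩
      -- k ≤ m // p
      have hmn : m = ((m.toNat : Nat) : Int) := by omega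
      have hjm' : j ≤ m.toNat := by omega
      have hkle : k ≤ m.toNat / p := by
        calc k = j / p := hkdef
        _ ≤ m.toNat / p := Nat.div_le_div_right hjm'
      rw [hmn, PySem.Int.floordiv_natCast]
      have : (k : Int) ≤ ((m.toNat / p : Nat) : Int) := by exact_mod_cast hkle
      omega
    · have : ((p * k : Nat) : Int) = (p : Int) * (k : Int) := by push_cast; ring
      rw [← this]
      simp [hmul]

-- the sieve lookup decides primality of every frequency 1 ≤ v ≤ m
theorem pvSieve_lookup (m v : Int) (h1 : 1 ≤ v) (hm : v ≤ m) :
    (PySem.List.pyGet?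
        (pvCross m (((List.replicate (m + 1).toNat true).set 0 false).set 1 false)) v).getD false
      = decide (Nat.Prime v.toNat) := by
  have hm1 : (1:Int) ≤ m := le_trans h1 hm
  have hv : v = ((v.toNat : Nat) : Int) := by omega
  set j := v.toNat with hjdef
  have hj1 : 1 ≤ j := by omega
  have hjm : (j : Int) ≤ m := by omega
  have hlen : (((List.replicate (m + 1).toNat true).set 0 false).set 1 false).length
      = m.toNat + 1 := by simp; omega
  have hjlen : j < m.toNat + 1 := by omega
  rw [hv, PySem.List.pyGet?_natCast]
  unfold pvCross
  rw [getElem?_foldl_foldl_set, hlen]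
  have hnocross1 : j = 1 → ¬ (∃ p ∈ PySem.List.pyRange 2 (m + 1) 1,
      ∃ k ∈ PySem.List.pyRange 2 (PySem.Int.floordiv m p + 1) 1, (p * k).toNat = j) := by
    rintro hj ⟨p, hp, k, hk, hpk⟩
    rw [PySem.List.mem_pyRange_one] at hp hk
    have h4 : (4:Int) ≤ p * k := by nlinarith [hp.1, hk.1]
    omega
  split_ifs with h
  · -- crossed: value false; j is composite
    obtain ⟨hcr, -⟩ := h
    rcases Nat.lt_or_ge j 2 with hj2 | hj2
    · exact absurd hcr (hnocross1 (by omega))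
    · have := (pvCrossed_iff m j hj2 hjm).mp hcr
      simp [this]
  · -- not crossed
    have hncr : ¬ (∃ p ∈ PySem.List.pyRange 2 (m + 1) 1,
        ∃ k ∈ PySem.List.pyRange 2 (PySem.Int.floordiv m p + 1) 1, (p * k).toNat = j) :=
      fun hc => h ⟨hc, hjlen⟩
    rw [List.getElem?_set, List.getElem?_set, List.getElem?_replicate]
    rcases Nat.lt_or_ge j 2 with hj2 | hj2
    · have hj : j = 1 := by omega
      simp [hj, Nat.not_prime_one]
      split_ifs <;> rfl
    · have hprime : Nat.Prime j := by
        by_contra hnp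
        exact hncr ((pvCrossed_iff m j hj2 hjm).mpr hnp)
      have hne0 : ¬ (0 = j) := by omega
      have hne1 : ¬ (1 = j) := by omega
      simp [hne0, hne1, hprime]
      rw [if_pos hjm]
      rfl

theorem any_congr_mem {α : Type} (l : List α) (p q : α → Bool)
    (h : ∀ x ∈ l, p x = q x) : l.any p = l.any q := by
  induction l with
  | nil => rfl
  | cons a l ih =>
    simp only [List.any_cons, h a (List.mem_cons_self), ih (fun x hx => h x (List.mem_cons_of_mem a hx))]

-- ===== VERDICT (by name: the statement is the Claim_ definition above) =====
theorem checkPrimeFrequency_spec : Claim_equal_checkPrimeFrequency := by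
  intro nums _
  show checkPrimeFrequency nums = checkPrimeFrequency_alt nums
  unfold checkPrimeFrequency checkPrimeFrequency_alt
  simp only [pvScan_eq_any]
  have hvals : (PySem.Dict.counter nums).values =
      (PySem.Dict.counter nums).keys.map (fun k => (PySem.Dict.counter nums).getD k 0) :=
    PySem.Dict.values_eq_map_keys _ (PySem.Dict.nodup_keys_counter nums) 0
  have hpos : ∀ v ∈ (PySem.Dict.counter nums).values, 1 ≤ v := by
    intro v hv
    rw [hvals] at hv
    obtain ⟨k, hk, rfl⟩ := List.mem_map.mp hv
    rw [PySem.Dict.keys_counter, PySem.Set.mem_ofList] at hk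
    rw [PySem.Dict.getD_counter]
    exact_mod_cast List.count_pos_iff.mpr hk
  cases hmax : PySem.List.max? (PySem.Dict.counter nums).values (fun v => v) with
  | none =>
    have : (PySem.Dict.counter nums).values = [] :=
      (PySem.List.max?_eq_none_iff _ _).mp hmax
    rw [hvals] at this
    simp only [List.map_eq_nil_iff] at this
    simp [this]
  | some m =>
    have hmem := PySem.List.max?_mem hmax
    have hle := PySem.List.max?_isMax hmax
    have hA : ((PySem.Dict.counter nums).keys.any
          (fun k => pvIsPrime ((PySem.Dict.counter nums).getD k 0)))
        = (PySem.Dict.counter nums).values.any (fun v => pvIsPrime v) := by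
      rw [hvals, List.any_map]; rfl
    rw [hA]
    refine any_congr_mem _ _ _ ?_
    intro v hv
    rw [pvIsPrime_eq v (hpos v hv), pvSieve_lookup m v (hpos v hv) (hle v hv)]
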